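-- pv_equiv track=rewrite | github.com/pypi-data/pypi-mirror-275 | packages/number2text/number2text-0.0.1.tar.gz/number2text-0.0.1/number2text/lang/ja.py | convert_less_than_ten_thousand
-- ===== SOURCE A (Python) =====
-- _ones= ["", "一", "二", "三", "四", "五", "六", "七", "八", "九"]
--
-- _tens = ["", "十", "二十", "三十", "四十", "五十", "六十", "七十", "八十", "九十"]
--
-- _hundreds = ["", "百", "二百", "三百", "四百", "五百", "六百", "七百", "八百", "九百"]
--
-- _thousands = ["", "千", "二千", "三千", "四千", "五千", "六千", "七千", "八千", "九千"]
--
-- def convert_less_than_ten_thousand(number):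
--     if number < 10:
--         return _ones[number]
--     elif number < 100:
--         tens, ones = divmod(number, 10)
--         if ones == 0:
--             return _tens[tens]
--         else:
--             return _tens[tens] + _ones[ones]
--     elif number < 1000:
--         hundreds, less_than_hundred = divmod(number, 100)
--         if less_than_hundred == 0:
--             return _hundreds[hundreds]
--         else:
--             return _hundreds[hundreds] + convert_less_than_ten_thousand(less_than_hundred)
--     else:
--         thousands, less_than_thousand = divmod(number, 1000)
--         if less_than_thousand == 0:
--             return _thousands[thousands]
--         else:
--             return _thousands[thousands] + convert_less_than_ten_thousand(less_than_thousand)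
-- ===== SOURCE B (Python) =====
-- _ones= ["", "一", "二", "三", "四", "五", "六", "七", "八", "九"]
-- _tens = ["", "十", "二十", "三十", "四十", "五十", "六十", "七十", "八十", "九十"]
-- _hundreds = ["", "百", "二百", "三百", "四百", "五百", "六百", "七百", "八百", "九百"]
-- _thousands = ["", "千", "二千", "三千", "四千", "五千", "六千", "七千", "八千", "九千"]
--
-- def convert_less_than_ten_thousand(number):
--     if number < 10:
--         return _ones[number]
--     tables = [_ones, _tens, _hundreds, _thousands]
--     top = 1 if number < 100 else 2 if number < 1000 else 3
--     place = 10 ** top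
--     result = tables[top][number // place]
--     rest = number % place
--     for pos in range(top - 1, -1, -1):
--         digit = (rest // 10 ** pos) % 10
--         if digit:
--             result += tables[pos][digit]
--     return result
-- ===== Notes on version B (the rewrite author's own statement) =====
-- stated objective: alternative
-- what changed: Replaces A's branch-per-magnitude recursion with one iterative pass: a table-of-tables indexed by digit position, the leading place taken once, then a descending loop over the remaining positions appending each nonzero digit's word.
-- outside the precondition, e.g. on convert_less_than_ten_thousand(-11): A raises IndexError, B raises IndexError; on convert_less_than_ten_thousand(10000): A raises IndexError, B raises IndexError
import Mathlib
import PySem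

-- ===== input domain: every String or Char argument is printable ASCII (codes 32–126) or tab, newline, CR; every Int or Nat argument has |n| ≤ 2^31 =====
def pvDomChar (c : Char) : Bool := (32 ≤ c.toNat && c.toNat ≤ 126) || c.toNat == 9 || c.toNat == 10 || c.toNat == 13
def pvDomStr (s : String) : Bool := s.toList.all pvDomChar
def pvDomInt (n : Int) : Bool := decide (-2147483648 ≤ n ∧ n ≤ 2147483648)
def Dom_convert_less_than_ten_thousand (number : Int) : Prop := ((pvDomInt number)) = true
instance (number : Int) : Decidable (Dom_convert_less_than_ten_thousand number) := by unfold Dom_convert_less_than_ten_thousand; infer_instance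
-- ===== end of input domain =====

-- B replaces A's branch-per-magnitude recursion with one iterative pass over digit positions
-- using a table-of-tables (objective: alternative decomposition, same cost).
-- Both ports use (pyGet? …).getD "" for list indexing; Pre_ excludes exactly the inputs where Python raises IndexError.

-- ===== PORT A =====
def pvOnes : List String := ["", "一", "二", "三", "四", "五", "六", "七", "八", "九"]
def pvTens : List String := ["", "十", "二十", "三十", "四十", "五十", "六十", "七十", "八十", "九十"]
def pvHundreds : List String := ["", "百", "二百", "三百", "四百", "五百", "六百", "七百", "八百", "九百"]
def pvThousands : List String := ["", "千", "二千", "三千", "四千", "五千", "六千", "七千", "八千", "九千"]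

-- fuel makes the recursion structural (it only bounds depth; 4 is never exhausted on Pre_ inputs)
def pvConvertA : Nat → Int → String
  | 0, _ => ""
  | fuel + 1, number =>
    if number < 10 then
      (PySem.List.pyGet? pvOnes number).getD ""
    else if number < 100 then
      let tens := PySem.Int.floordiv number 10
      let ones := PySem.Int.mod number 10
      if ones = 0 then (PySem.List.pyGet? pvTens tens).getD ""
      else (PySem.List.pyGet? pvTens tens).getD "" ++ (PySem.List.pyGet? pvOnes ones).getD ""
    else if number < 1000 then
      let hundreds := PySem.Int.floordiv number 100
      let lessThanHundred := PySem.Int.mod number 100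
      if lessThanHundred = 0 then (PySem.List.pyGet? pvHundreds hundreds).getD ""
      else (PySem.List.pyGet? pvHundreds hundreds).getD "" ++ pvConvertA fuel lessThanHundred
    else
      let thousands := PySem.Int.floordiv number 1000
      let lessThanThousand := PySem.Int.mod number 1000
      if lessThanThousand = 0 then (PySem.List.pyGet? pvThousands thousands).getD ""
      else (PySem.List.pyGet? pvThousands thousands).getD "" ++ pvConvertA fuel lessThanThousand

def convert_less_than_ten_thousand (number : Int) : String := pvConvertA 4 number

-- ===== PORT B =====
def convert_less_than_ten_thousand_alt (number : Int) : String :=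
  if number < 10 then
    (PySem.List.pyGet? pvOnes number).getD ""
  else
    let tables : List (List String) := [pvOnes, pvTens, pvHundreds, pvThousands]
    let top : Int := if number < 100 then 1 else if number < 1000 then 2 else 3
    let place : Int := 10 ^ top.toNat
    let result :=
      (PySem.List.pyGet? ((PySem.List.pyGet? tables top).getD [])
        (PySem.Int.floordiv number place)).getD ""
    let rest := PySem.Int.mod number place
    (PySem.List.pyRange (top - 1) (-1) (-1)).foldl
      (fun acc pos =>
        let digit := PySem.Int.mod (PySem.Int.floordiv rest (10 ^ pos.toNat)) 10
        if digit ≠ 0 then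
          acc ++ (PySem.List.pyGet? ((PySem.List.pyGet? tables pos).getD []) digit).getD ""
        else acc)
      result

-- ===== PRECONDITION & SPEC =====
-- Pre_ excludes exactly the inputs on which Python A raises IndexError: number ≤ -11 (negative
-- index past the front of _ones) and number ≥ 10000 (leading digit ≥ 10).
def Pre_convert_less_than_ten_thousand (number : Int) : Prop := -10 ≤ number ∧ number < 10000
instance (number : Int) : Decidable (Pre_convert_less_than_ten_thousand number) := by unfold Pre_convert_less_than_ten_thousand; infer_instance
def pvWitness_convert_less_than_ten_thousand : Int := (1234)

def Spec_convert_less_than_ten_thousand (number : Int) (out : String) : Prop := out = convert_less_than_ten_thousand_alt number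
instance (number : Int) (out : String) : Decidable (Spec_convert_less_than_ten_thousand number out) := by unfold Spec_convert_less_than_ten_thousand; infer_instance

-- ===== CLAIM (what is proved, stated in full; the proofs are below) =====
def Claim_equal_convert_less_than_ten_thousand : Prop := ∀ (number : Int), Dom_convert_less_than_ten_thousand number → Pre_convert_less_than_ten_thousand number → Spec_convert_less_than_ten_thousand number (convert_less_than_ten_thousand number)

-- ===== LEMMAS AND PROOFS =====
lemma pvMod10 (a : Int) : PySem.Int.mod a 10 = a % 10 := PySem.Int.mod_eq_emod_of_pos (by norm_num)
lemma pvMod100 (a : Int) : PySem.Int.mod a 100 = a % 100 := PySem.Int.mod_eq_emod_of_pos (by norm_num)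
lemma pvMod1000 (a : Int) : PySem.Int.mod a 1000 = a % 1000 := PySem.Int.mod_eq_emod_of_pos (by norm_num)
lemma pvDiv1 (a : Int) : PySem.Int.floordiv a 1 = a := by
  rw [PySem.Int.floordiv_eq_ediv_of_pos (by norm_num)]; simp
lemma pvDiv10 (a : Int) : PySem.Int.floordiv a 10 = a / 10 := PySem.Int.floordiv_eq_ediv_of_pos (by norm_num)
lemma pvDiv100 (a : Int) : PySem.Int.floordiv a 100 = a / 100 := PySem.Int.floordiv_eq_ediv_of_pos (by norm_num)
lemma pvDiv1000 (a : Int) : PySem.Int.floordiv a 1000 = a / 1000 := PySem.Int.floordiv_eq_ediv_of_pos (by norm_num)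
lemma pvRange0 : PySem.List.pyRange 0 (-1) (-1) = [0] := by decide
lemma pvRange1 : PySem.List.pyRange 1 (-1) (-1) = [1, 0] := by decide
lemma pvRange2 : PySem.List.pyRange 2 (-1) (-1) = [2, 1, 0] := by decide

-- fuel irrelevance of A's recursion below 100: no recursive call happens there
lemma pvConvA_fuel_small (k : Nat) (r : Int) (h : r < 100) :
    pvConvertA (k + 2) r = pvConvertA 2 r := by
  by_cases h10 : r < 10 <;> simp [pvConvertA, h10, h]

-- B's two lowest loop steps produce exactly what A's recursive call on r % 100 produces
lemma pvTail2 (r : Int) (acc : String) :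
    List.foldl
      (fun acc pos =>
        let digit := PySem.Int.mod (PySem.Int.floordiv r (10 ^ pos.toNat)) 10
        if digit ≠ 0 then
          acc ++ (PySem.List.pyGet? ((PySem.List.pyGet? [pvOnes, pvTens, pvHundreds, pvThousands] pos).getD []) digit).getD ""
        else acc)
      acc [1, 0]
    = if r % 100 = 0 then acc else acc ++ pvConvertA 2 (r % 100) := by
  simp only [List.foldl]
  rw [show (PySem.List.pyGet? [pvOnes, pvTens, pvHundreds, pvThousands] 1).getD ([]:List String) = pvTens from by decide,
      show (PySem.List.pyGet? [pvOnes, pvTens, pvHundreds, pvThousands] 0).getD ([]:List String) = pvOnes from by decide]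
  norm_num [pvMod10, pvDiv1, pvDiv10]
  set s := r % 100 with hs
  have hd : r / 10 % 10 = s / 10 := by omega
  have hm : r % 10 = s % 10 := by omega
  rw [hd, hm]
  have hpv : pvConvertA 2 s = if s < 10 then (PySem.List.pyGet? pvOnes s).getD ""
      else if s % 10 = 0 then (PySem.List.pyGet? pvTens (s / 10)).getD ""
      else (PySem.List.pyGet? pvTens (s / 10)).getD "" ++ (PySem.List.pyGet? pvOnes (s % 10)).getD "" := by
    have h100 : s < 100 := by omega
    by_cases h : s < 10 <;> simp [pvConvertA, h, h100]
  rw [hpv]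
  split_ifs <;>
    first
      | rfl
      | omega
      | (rw [show s % 10 = s from by omega])
      | exact String.append_assoc

-- A's recursive helper at one thousand digit of headroom, characterised
lemma pvA3 (r : Int) (h : r < 1000) :
    pvConvertA 3 r = if r < 100 then pvConvertA 2 r
      else if r % 100 = 0 then (PySem.List.pyGet? pvHundreds (r / 100)).getD ""
      else (PySem.List.pyGet? pvHundreds (r / 100)).getD "" ++ pvConvertA 2 (r % 100) := by
  by_cases h100 : r < 100
  · rw [if_pos h100]; exact pvConvA_fuel_small 1 r h100
  · have h10 : ¬ r < 10 := by omega
    simp only [pvConvertA, if_neg h10, if_neg h100, if_pos h, pvMod100, pvDiv100]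

lemma pvMain (n : Int) :
    convert_less_than_ten_thousand n = convert_less_than_ten_thousand_alt n := by
  by_cases c1 : n < 10
  · simp [convert_less_than_ten_thousand, convert_less_than_ten_thousand_alt, pvConvertA, c1]
  · by_cases c2 : n < 100
    · -- tens: B's loop runs over the single position 0
      simp only [convert_less_than_ten_thousand, convert_less_than_ten_thousand_alt, pvConvertA,
        if_neg c1, if_pos c2]
      norm_num [pvRange0, List.foldl, pvMod10, pvDiv1, pvDiv10]
      split_ifs <;> first | rfl | omega
    · by_cases c3 : n < 1000
      · -- hundreds: A one step; B = leading lookup then pvTail2 on n % 100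
        have hA : convert_less_than_ten_thousand n
            = if PySem.Int.mod n 100 = 0 then (PySem.List.pyGet? pvHundreds (PySem.Int.floordiv n 100)).getD ""
              else (PySem.List.pyGet? pvHundreds (PySem.Int.floordiv n 100)).getD "" ++ pvConvertA 3 (PySem.Int.mod n 100) := by
          simp only [convert_less_than_ten_thousand, pvConvertA, if_neg c1, if_neg c2, if_pos c3]
        rw [hA]
        simp only [convert_less_than_ten_thousand_alt, if_neg c1, if_neg c2, if_pos c3]
        rw [show (10:Int) ^ ((2:Int)).toNat = 100 from by decide,
            show ((2:Int) - 1) = 1 from by norm_num, pvRange1,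
            show (PySem.List.pyGet? [pvOnes, pvTens, pvHundreds, pvThousands] (2:Int)).getD ([]:List String) = pvHundreds from by decide]
        rw [pvTail2 (PySem.Int.mod n 100) _]
        rw [pvA3 _ (by rw [pvMod100]; omega), pvMod100, pvDiv100]
        rw [show n % 100 % 100 = n % 100 from by omega]
        have hlt : n % 100 < 100 := by omega
        rw [if_pos hlt]
      · -- thousands: A one step; B = leading lookup, one explicit loop step, then pvTail2 on n % 1000
        have c2' : ¬ n < 100 := by omega
        have hA : convert_less_than_ten_thousand n
            = if PySem.Int.mod n 1000 = 0 then (PySem.List.pyGet? pvThousands (PySem.Int.floordiv n 1000)).getD ""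
              else (PySem.List.pyGet? pvThousands (PySem.Int.floordiv n 1000)).getD "" ++ pvConvertA 3 (PySem.Int.mod n 1000) := by
          simp only [convert_less_than_ten_thousand, pvConvertA, if_neg c1, if_neg c2, if_neg c3]
        rw [hA]
        simp only [convert_less_than_ten_thousand_alt, if_neg c1, if_neg c2, if_neg c3]
        rw [show (10:Int) ^ ((3:Int)).toNat = 1000 from by decide,
            show ((3:Int) - 1) = 2 from by norm_num, pvRange2,
            show (PySem.List.pyGet? [pvOnes, pvTens, pvHundreds, pvThousands] (3:Int)).getD ([]:List String) = pvThousands from by decide]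
        rw [List.foldl_cons]
        simp only [show (10:Int) ^ ((2:Int)).toNat = 100 from by decide,
          show (PySem.List.pyGet? [pvOnes, pvTens, pvHundreds, pvThousands] (2:Int)).getD ([]:List String) = pvHundreds from by decide]
        rw [pvTail2 (PySem.Int.mod n 1000) _]
        rw [pvA3 _ (by rw [pvMod1000]; omega)]
        simp only [pvMod10, pvMod1000, pvDiv100, pvDiv1000]
        rw [show n % 1000 / 100 % 10 = n % 1000 / 100 from by omega]
        split_ifs <;>
          first
            | rfl
            | omega
            | exact String.append_assoc
            | exact String.append_assoc.symm
            | (rw [show n % 1000 % 100 = n % 1000 from by omega])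

-- ===== VERDICT (by name: the statement is the Claim_ definition above) =====
theorem convert_less_than_ten_thousand_spec : Claim_equal_convert_less_than_ten_thousand := by
  intro number _ _
  exact pvMain number
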